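-- pv_equiv track=rewrite | github.com/neulab/awesome-align | tools/aer.py | calculate_internal_jumps
-- ===== SOURCE A (Python) =====
-- def calculate_internal_jumps(alignments):
--     """ Count number of times the set of source word indices aligned to a target word index are not adjacent
--         Each non adjacent set of source word indices counts only once
--     >>> calculate_internal_jumps([{1,2,4}, {42}])
--     1
--     >>> calculate_internal_jumps([{1,2,3,4}])
--     0
--     >>> calculate_internal_jumps([set()])
--     0
--     """
--     def contiguous(s):
--         if len(s) <= 1:
--             return True
--         else:
--             elements_in_contiguous_set = max(s) - min(s) + 1
--             return elements_in_contiguous_set == len(s)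
--
--     return [contiguous(s) for s in alignments].count(False)
-- ===== SOURCE B (Python) =====
-- def calculate_internal_jumps(alignments):
--     count = 0
--     for s in alignments:
--         xs = sorted(s)
--         if any(b - a != 1 for a, b in zip(xs, xs[1:])):
--             count += 1
--     return count
-- ===== Notes on version B (the rewrite author's own statement) =====
-- stated objective: alternative
-- what changed: Replaces the max-min+1==len arithmetic contiguity test and the build-a-list-of-bools-then-.count(False) pass with a sort-and-scan of adjacent pairs per set and a running counter accumulated in one loop.
import Mathlib
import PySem

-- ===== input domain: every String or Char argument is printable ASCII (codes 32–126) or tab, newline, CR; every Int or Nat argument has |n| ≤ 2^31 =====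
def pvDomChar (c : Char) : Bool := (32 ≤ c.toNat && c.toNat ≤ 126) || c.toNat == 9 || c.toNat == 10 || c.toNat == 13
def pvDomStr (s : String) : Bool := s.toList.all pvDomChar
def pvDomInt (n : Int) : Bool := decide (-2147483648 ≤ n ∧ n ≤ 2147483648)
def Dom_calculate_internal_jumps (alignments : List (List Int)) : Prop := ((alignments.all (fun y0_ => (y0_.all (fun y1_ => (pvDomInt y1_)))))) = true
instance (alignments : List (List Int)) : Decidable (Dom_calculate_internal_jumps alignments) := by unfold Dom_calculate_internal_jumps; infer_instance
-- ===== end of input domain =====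

-- B replaces the max-min+1==len closed-form contiguity test and the bool-list .count(False)
-- with a per-set sort-and-adjacent-scan and one running counter (objective: alternative).

-- ===== PORT A =====
-- inner helper 'contiguous(s)'; max()/min() only reached when len(s) >= 2, so the
-- none branch of max?/min? is unreachable (we return true there, matching nothing Python does)
def pvContiguousA (s : List Int) : Bool :=
  if s.length ≤ 1 then true
  else
    match PySem.List.max? s (fun x => x), PySem.List.min? s (fun x => x) with
    | some mx, some mn => decide (mx - mn + 1 = (s.length : Int))
    | _, _ => true

def calculate_internal_jumps (alignments : List (List Int)) : Int :=
  ((PySem.List.count (alignments.map pvContiguousA) false : Nat) : Int)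

-- ===== PORT B =====
-- 'any(b - a != 1 for a, b in zip(xs, xs[1:]))' as an adjacent-pair scan
def pvHasJump : List Int → Bool
  | a :: b :: rest => (decide (b - a ≠ 1)) || pvHasJump (b :: rest)
  | _ => false

def calculate_internal_jumps_alt (alignments : List (List Int)) : Int :=
  alignments.foldl
    (fun count s =>
      if pvHasJump (PySem.List.sorted s (fun x => x) false) then count + 1 else count)
    0

-- ===== PRECONDITION & SPEC =====
-- Each alignment is a Python SET, encoded per the type convention as a list of DISTINCT
-- elements; Pre_ states exactly that representation invariant (A raises nowhere).
def Pre_calculate_internal_jumps (alignments : List (List Int)) : Prop :=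
  ∀ s ∈ alignments, s.Nodup
instance (alignments : List (List Int)) : Decidable (Pre_calculate_internal_jumps alignments) := by
  unfold Pre_calculate_internal_jumps; infer_instance

def pvWitness_calculate_internal_jumps : List (List Int) := [[1, 2, 4], [42]]

def Spec_calculate_internal_jumps (alignments : List (List Int)) (out : Int) : Prop :=
  out = calculate_internal_jumps_alt alignments
instance (alignments : List (List Int)) (out : Int) : Decidable (Spec_calculate_internal_jumps alignments out) := by
  unfold Spec_calculate_internal_jumps; infer_instance

-- ===== CLAIM (what is proved, stated in full; the proofs are below) =====
def Claim_equal_calculate_internal_jumps : Prop :=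
  ∀ (alignments : List (List Int)), Dom_calculate_internal_jumps alignments →
    Pre_calculate_internal_jumps alignments →
    Spec_calculate_internal_jumps alignments (calculate_internal_jumps alignments)

-- ===== LEMMAS AND PROOFS =====

-- strictly increasing chain: last element is at least head + length of tail
theorem pvLast_lb (x : Int) (l : List Int)
    (h : (x :: l).Pairwise (· < ·)) :
    x + l.length ≤ (x :: l).getLast (by simp) := by
  induction l generalizing x with
  | nil => simp
  | cons b rest ih =>
      have hxb : x < b := (List.pairwise_cons.1 h).1 b (by simp)
      have ht : (b :: rest).Pairwise (· < ·) := (List.pairwise_cons.1 h).2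
      have := ih b ht
      have hlast : (x :: b :: rest).getLast (by simp) = (b :: rest).getLast (by simp) := by
        simp [List.getLast]
      rw [hlast]
      simp only [List.length_cons] at *
      push_cast at *
      omega

-- strictly increasing chain: every element ≤ last
theorem pvLast_ub (l : List Int) (h : l.Pairwise (· < ·)) (hne : l ≠ []) :
    ∀ y ∈ l, y ≤ l.getLast hne := by
  induction l with
  | nil => simp at hne
  | cons x t ih =>
      intro y hy
      cases t with
      | nil => simp at hy; simp [hy, List.getLast]
      | cons b rest =>
          have hx : ∀ z ∈ b :: rest, x < z := (List.pairwise_cons.1 h).1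
          have ht : (b :: rest).Pairwise (· < ·) := (List.pairwise_cons.1 h).2
          have hlast : (x :: b :: rest).getLast (by simp) = (b :: rest).getLast (by simp) := by
            simp [List.getLast]
          rw [hlast]
          rcases List.mem_cons.1 hy with rfl | hy'
          · have hb : y < b := hx b (by simp)
            have h2 := pvLast_lb b rest ht
            omega
          · exact ih ht (by simp) y hy'

-- sort-and-scan test on a strictly increasing chain ↔ the max-min+1 = len identity
theorem pvJump_iff (x : Int) (l : List Int)
    (h : (x :: l).Pairwise (· < ·)) :
    pvHasJump (x :: l) = false ↔
      (x :: l).getLast (by simp) - x + 1 = ((x :: l).length : Int) := by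
  induction l generalizing x with
  | nil => simp [pvHasJump, List.getLast]
  | cons b rest ih =>
      have hxb : x < b := (List.pairwise_cons.1 h).1 b (by simp)
      have ht : (b :: rest).Pairwise (· < ·) := (List.pairwise_cons.1 h).2
      have hlast : (x :: b :: rest).getLast (by simp) = (b :: rest).getLast (by simp) := by
        simp [List.getLast]
      have hlb := pvLast_lb b rest ht
      constructor
      · intro hjf
        have h1 : b - x = 1 ∧ pvHasJump (b :: rest) = false := by
          simp [pvHasJump] at hjf
          exact ⟨by omega, hjf.2⟩
        have := (ih b ht).1 h1.2
        rw [hlast]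
        simp only [List.length_cons] at *
        push_cast at *
        omega
      · intro hlen
        rw [hlast] at hlen
        simp only [List.length_cons] at *
        -- L - x = rest.length + 2 - 1, and L ≥ b + rest.length, b > x ⇒ b = x + 1, L - b + 1 = len
        have hb1 : b - x = 1 := by push_cast at *; omega
        have htail : (b :: rest).getLast (by simp) - b + 1 = (((b :: rest).length : Nat) : Int) := by
          simp only [List.length_cons]
          push_cast at *
          omega
        have := (ih b ht).2 htail
        simp [pvHasJump, this]
        omega

-- per-set agreement: on a duplicate-free list, A's contiguity test equals B's sort-and-scan
theorem pvSet_agree (s : List Int) (hnd : s.Nodup) :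
    pvContiguousA s = !pvHasJump (PySem.List.sorted s (fun x => x) false) := by
  set t := PySem.List.sorted s (fun x => x) false with hte
  have hperm : t.Perm s := PySem.List.sorted_perm s (fun x => x) false
  have hlen : t.length = s.length := hperm.length_eq
  have hndt : t.Nodup := hperm.nodup_iff.2 hnd
  have hple : t.Pairwise (fun a b => a ≤ b) := by
    simpa using PySem.List.sorted_pairwise s (fun x => x)
  have hplt : t.Pairwise (· < ·) := by
    refine (List.Pairwise.and hple hndt).imp ?_
    intro a b ⟨h1, h2⟩; exact lt_of_le_of_ne h1 h2
  by_cases hsl : s.length ≤ 1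
  · have hj : pvHasJump t = false := by
      cases ht2 : t with
      | nil => simp [pvHasJump]
      | cons a r =>
          cases r with
          | nil => simp [pvHasJump]
          | cons b r2 => rw [ht2] at hlen; simp at hlen; omega
    simp [pvContiguousA, hsl, hj]
  · cases ht : t with
    | nil => rw [ht] at hlen; simp at hlen; omega
    | cons x l =>
        rw [ht] at hplt hlen
        have hxm : x ∈ s := hperm.mem_iff.1 (by rw [ht]; simp)
        have hmin : PySem.List.min? s (fun x => x) = some x := by
          rcases hmn : PySem.List.min? s (fun x => x) with _ | m
          · rw [PySem.List.min?_eq_none_iff] at hmn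
            subst hmn; simp at hlen
          · have hm1 : m ∈ s := PySem.List.min?_mem hmn
            have hm2 : m ≤ x := PySem.List.min?_isMin hmn x hxm
            have hx2 : x ≤ m := by
              have hms : m ∈ x :: l := by rw [← ht]; exact hperm.mem_iff.2 hm1
              rcases List.mem_cons.1 hms with rfl | hmem
              · exact le_rfl
              · exact le_of_lt ((List.pairwise_cons.1 hplt).1 m hmem)
            rw [le_antisymm hm2 hx2]
        have hmax : PySem.List.max? s (fun x => x) = some ((x :: l).getLast (by simp)) := by
          rcases hmx : PySem.List.max? s (fun x => x) with _ | m
          · rw [PySem.List.max?_eq_none_iff] at hmx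
            subst hmx; simp at hlen
          · have hm1 : m ∈ s := PySem.List.max?_mem hmx
            have hlm : (x :: l).getLast (by simp) ∈ s := by
              refine hperm.mem_iff.1 ?_
              rw [ht]; exact List.getLast_mem _
            have h2 : (x :: l).getLast (by simp) ≤ m := PySem.List.max?_isMax hmx _ hlm
            have h3 : m ≤ (x :: l).getLast (by simp) := by
              have hms : m ∈ (x :: l) := by rw [← ht]; exact hperm.mem_iff.2 hm1
              exact pvLast_ub (x :: l) hplt (by simp) m hms
            rw [le_antisymm h3 h2]
        have hiff := pvJump_iff x l hplt
        simp only [pvContiguousA, if_neg hsl, hmax, hmin]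
        cases hj : pvHasJump (x :: l) with
        | false =>
            have h := hiff.1 hj
            rw [← hlen]
            simp [h]
        | true =>
            simp only [Bool.not_true, decide_eq_false_iff_not]
            intro hc
            rw [← hlen] at hc
            have : pvHasJump (x :: l) = false := hiff.2 hc
            rw [this] at hj; exact Bool.false_ne_true hj

-- folding B's loop equals the accumulated count of A's false entries
theorem pvFold_count (l : List (List Int)) (a : Int)
    (hnd : ∀ s ∈ l, s.Nodup) :
    l.foldl
      (fun count s =>
        if pvHasJump (PySem.List.sorted s (fun x => x) false) then count + 1 else count)
      a
    = a + ((PySem.List.count (l.map pvContiguousA) false : Nat) : Int) := by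
  induction l generalizing a with
  | nil => simp [PySem.List.count]
  | cons s rest ih =>
      have hs : s.Nodup := hnd s (by simp)
      have hrest : ∀ u ∈ rest, u.Nodup := fun u hu => hnd u (by simp [hu])
      have hag := pvSet_agree s hs
      simp only [List.foldl_cons, List.map_cons]
      rw [ih _ hrest]
      rcases hj : pvHasJump (PySem.List.sorted s (fun x => x) false) with _ | _
      · rw [hj] at hag
        simp [PySem.List.count, hag]
      · rw [hj] at hag
        simp [PySem.List.count, hag]
        omega

-- ===== VERDICT (by name: the statement is the Claim_ definition above) =====
theorem calculate_internal_jumps_spec : Claim_equal_calculate_internal_jumps := by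
  intro alignments _ hpre
  unfold Spec_calculate_internal_jumps calculate_internal_jumps calculate_internal_jumps_alt
  rw [pvFold_count alignments 0 hpre]
  omega
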